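-- pv_equiv track=rewrite | github.com/vigo999/mindspore-skills | skills/readiness-agent/scripts/readiness_report.py | derive_evidence_level
-- ===== SOURCE A (Python) =====
-- from typing import List, Optional, Set, Tuple
--
-- def derive_evidence_level(checks: List[dict]) -> str:
--     ok_ids = {str(item.get("id")) for item in checks if str(item.get("status") or "").lower() == "ok"}
--     if "task-smoke-executed" in ok_ids:
--         return "task_smoke"
--     if "runtime-smoke" in ok_ids:
--         return "runtime_smoke"
--     if "framework-importability" in ok_ids:
--         return "import"
--     return "structural"
-- ===== SOURCE B (Python) =====
-- _PRIO = {"task-smoke-executed": 0, "runtime-smoke": 1, "framework-importability": 2}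
-- _LABELS = ["task_smoke", "runtime_smoke", "import"]
--
-- def derive_evidence_level(checks):
--     best = None
--     for item in checks:
--         if str(item.get("status") or "").lower() == "ok":
--             r = _PRIO.get(str(item.get("id")))
--             if r is not None and (best is None or r < best):
--                 best = r
--     return _LABELS[best] if best is not None else "structural"
-- ===== Notes on version B (the rewrite author's own statement) =====
-- stated objective: alternative
-- what changed: Replaces building a set of all ok ids and three sequential membership branches with a single pass that keeps the minimum priority rank found via a priority dict, indexing a rank-to-label table at the end.
import Mathlib
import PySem

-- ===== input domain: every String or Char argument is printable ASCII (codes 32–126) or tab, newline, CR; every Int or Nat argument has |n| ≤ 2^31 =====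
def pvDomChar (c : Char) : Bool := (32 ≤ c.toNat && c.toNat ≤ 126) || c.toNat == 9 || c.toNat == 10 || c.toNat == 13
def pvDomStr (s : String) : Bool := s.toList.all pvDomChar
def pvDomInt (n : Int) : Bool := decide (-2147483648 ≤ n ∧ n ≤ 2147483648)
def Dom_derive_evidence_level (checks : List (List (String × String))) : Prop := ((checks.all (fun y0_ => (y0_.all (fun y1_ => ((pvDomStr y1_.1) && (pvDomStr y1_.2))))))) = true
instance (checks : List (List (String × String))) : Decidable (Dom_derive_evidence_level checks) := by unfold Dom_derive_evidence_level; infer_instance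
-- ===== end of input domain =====

-- B replaces A's set-of-ok-ids plus three membership branches with one min-rank reduction over a priority dict (objective: alternative).


-- ===== PORT A =====
-- str(item.get("id")): a missing key gives Python None, str(None) = "None"
def pvIdStr (item : List (String × String)) : String :=
  match (PySem.Dict.mk item).get? "id" with
  | none => "None"
  | some s => s

-- str(item.get("status") or "").lower() == "ok" (None and "" both collapse to "")
def pvOkStatus (item : List (String × String)) : Bool :=
  PySem.Str.lower (((PySem.Dict.mk item).get? "status").getD "") == "ok"

def derive_evidence_level (checks : List (List (String × String))) : String :=
  let ok_ids : PySem.Set String :=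
    PySem.Set.ofList ((checks.filter (fun item => pvOkStatus item)).map (fun item => pvIdStr item))
  if ok_ids.contains "task-smoke-executed" then "task_smoke"
  else if ok_ids.contains "runtime-smoke" then "runtime_smoke"
  else if ok_ids.contains "framework-importability" then "import"
  else "structural"

-- ===== PORT B =====
def pvPrio : PySem.Dict String Int :=
  PySem.Dict.mk [("task-smoke-executed", 0), ("runtime-smoke", 1), ("framework-importability", 2)]

def pvLabels : List String := ["task_smoke", "runtime_smoke", "import"]

def pvStep (best : Option Int) (item : List (String × String)) : Option Int :=
  if pvOkStatus item then
    match pvPrio.get? (pvIdStr item) with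
    | none => best
    | some r =>
      match best with
      | none => some r
      | some b => if r < b then some r else best
  else best

def derive_evidence_level_alt (checks : List (List (String × String))) : String :=
  match checks.foldl pvStep none with
  | none => "structural"
  | some b => (PySem.List.pyGet? pvLabels b).getD "structural"  -- _LABELS[best]; the rank is always 0/1/2, so in range

-- ===== PRECONDITION & SPEC =====
def Spec_derive_evidence_level (checks : List (List (String × String))) (out : String) : Prop := out = derive_evidence_level_alt checks
instance (checks : List (List (String × String))) (out : String) : Decidable (Spec_derive_evidence_level checks out) := by unfold Spec_derive_evidence_level; infer_instance

-- ===== CLAIM (what is proved, stated in full; the proofs are below) =====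
def Claim_equal_derive_evidence_level : Prop := ∀ (checks : List (List (String × String))), Dom_derive_evidence_level checks → Spec_derive_evidence_level checks (derive_evidence_level checks)

-- ===== LEMMAS AND PROOFS =====

-- is there an ok item with this id?
def pvHas (checks : List (List (String × String))) (s : String) : Bool :=
  checks.any (fun item => pvOkStatus item && (pvIdStr item == s))

-- the minimum rank, expressed through the three membership bits
def pvM (checks : List (List (String × String))) : Option Int :=
  if pvHas checks "task-smoke-executed" then some 0
  else if pvHas checks "runtime-smoke" then some 1
  else if pvHas checks "framework-importability" then some 2
  else none

def pvComb : Option Int → Option Int → Option Int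
  | none, b => b
  | some a, none => some a
  | some a, some b => some (min a b)

lemma pvStep_eq (acc : Option Int) (item : List (String × String)) :
    pvStep acc item = pvComb acc (if pvOkStatus item then pvPrio.get? (pvIdStr item) else none) := by
  unfold pvStep pvComb
  cases h : pvOkStatus item <;> cases acc <;> simp <;>
    cases hg : pvPrio.get? (pvIdStr item) <;> simp [min_def] <;> split <;> simp <;> omega

lemma pvPrio_get (s : String) :
    pvPrio.get? s =
      if s = "task-smoke-executed" then some 0
      else if s = "runtime-smoke" then some 1
      else if s = "framework-importability" then some 2 else none := by
  simp only [pvPrio, PySem.Dict.get?_mk_cons]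
  split_ifs with h1 h2 h3 <;> simp_all [PySem.Dict.get?]

lemma pvComb_step_M (item : List (String × String)) (l : List (List (String × String))) :
    pvComb (if pvOkStatus item then pvPrio.get? (pvIdStr item) else none) (pvM l) = pvM (item :: l) := by
  unfold pvM pvHas
  rw [pvPrio_get]
  cases hok : pvOkStatus item
  · simp [pvComb, hok]
  · by_cases h1 : pvIdStr item = "task-smoke-executed" <;>
      by_cases h2 : pvIdStr item = "runtime-smoke" <;>
        by_cases h3 : pvIdStr item = "framework-importability" <;>
          simp_all [pvComb] <;> split_ifs <;> simp [pvComb]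

lemma pvFoldl_eq (l : List (List (String × String))) (acc : Option Int) :
    l.foldl pvStep acc = pvComb acc (pvM l) := by
  induction l generalizing acc with
  | nil => cases acc <;> simp [pvM, pvHas, pvComb]
  | cons item rest ih =>
    rw [List.foldl_cons, ih, pvStep_eq, ← pvComb_step_M item rest]
    cases acc <;> cases hi : (if pvOkStatus item then pvPrio.get? (pvIdStr item) else none) <;>
      cases hm : pvM rest <;> simp [pvComb, min_assoc]

lemma pvContains_eq (checks : List (List (String × String))) (s : String) :
    (PySem.Set.ofList ((checks.filter (fun item => pvOkStatus item)).map (fun item => pvIdStr item))).contains s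
      = pvHas checks s := by
  unfold pvHas
  rcases h : checks.any (fun item => pvOkStatus item && (pvIdStr item == s)) with _ | _
  · simp only [List.any_eq_false] at h
    rw [Bool.eq_false_iff]
    intro hc
    rw [PySem.Set.contains_iff, PySem.Set.mem_ofList] at hc
    obtain ⟨item, hmem, hid⟩ := List.mem_map.mp hc
    obtain ⟨hin, hok⟩ := List.mem_filter.mp hmem
    have := h item hin
    simp [hok, hid] at this
  · simp only [List.any_eq_true] at h
    obtain ⟨item, hin, hb⟩ := h
    simp only [Bool.and_eq_true, beq_iff_eq] at hb
    rw [PySem.Set.contains_iff, PySem.Set.mem_ofList]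
    exact List.mem_map.mpr ⟨item, List.mem_filter.mpr ⟨hin, hb.1⟩, hb.2⟩

-- ===== VERDICT (by name: the statement is the Claim_ definition above) =====
theorem derive_evidence_level_spec : Claim_equal_derive_evidence_level := by
  intro checks _
  unfold Spec_derive_evidence_level derive_evidence_level derive_evidence_level_alt
  rw [pvFoldl_eq]
  simp only [pvContains_eq, pvComb]
  unfold pvM
  split_ifs <;> simp [pvLabels, PySem.List.pyGet?, PySem.List.pyIdx?]
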